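-- pv_equiv track=rewrite | github.com/cdccnleo/RQA2025 | src/infrastructure/config/tools/infrastructure_index.py | get_interface_test_status
-- ===== SOURCE A (Python) =====
-- INTERFACE_TEST_STATUS = {
--     'configuration': {
--         'tested': [],
--         'partially_tested': [],
--         'not_tested': [
--             'IConfigurationManager',
--             'IConfigurationProvider',
--             'IConfigurationValidator',
--             'IConfigurationLoader',
--             'IConfigurationStore',
--             'IConfigurationCache',
--             'IConfigurationSecurity',
--             'IConfigurationMigration',
--             'IConfigurationBackup',
--             'IConfigurationRestore',
--             'IConfigurationSync',
--             'IConfigurationAudit',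
--             'IConfigurationTemplate',
--             'IConfigurationSchema',
--             'IConfigurationRule',
--             'IConfigurationPolicy',
--             'IConfigurationCompliance',
--             'IConfigurationGovernance',
--             'IConfigurationLifecycle',
--             'IConfigurationVersioning'
--         ]
--     },
--     'monitoring': {
--         'tested': [],
--         'partially_tested': [],
--         'not_tested': [
--             'IMonitor',
--             'IMonitorFactory',
--             'IPerformanceMonitor',
--             'IBusinessMetricsMonitor',
--             'ISystemMonitor',
--             'IApplicationMonitor',
--             'IAlertManager',
--             'IMetricsStore',
--             'IAlertStore',
--             'IMonitorPlugin',
--             'IStorageMonitorPlugin',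
--             'IDisasterMonitorPlugin',
--             'IModelMonitorPlugin',
--             'IBehaviorMonitorPlugin',
--             'IMonitoringService',
--             'IMonitorDecorator',
--             'IMonitoringIntegration',
--             'IMonitoringPerformanceOptimizer'
--         ]
--     },
--     'cache': {
--         'tested': [],
--         'partially_tested': [],
--         'not_tested': [
--             'ICache',
--             'ICacheManager',
--             'IL1Cache',
--             'IL2Cache',
--             'IL3Cache',
--             'IL4Cache',
--             'ILRUCache',
--             'ILFUCache',
--             'ITTLCache',
--             'ICompressionCache',
--             'IEncryptionCache',
--             'ITaggedCache',
--             'IIntelligentCache',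
--             'IAdaptiveCache',
--             'ICacheFactory',
--             'ICacheDecorator',
--             'ICacheMonitor',
--             'ICacheOptimizer',
--             'ICacheIntegration',
--             'ICacheSecurity'
--         ]
--     }
-- }
--
-- def get_interface_test_status(interface_name: str) -> dict:
--
--     for category, status in INTERFACE_TEST_STATUS.items():
--         if interface_name in status['tested']:
--             return {'status': 'tested', 'category': category}
--         elif interface_name in status['partially_tested']:
--             return {'status': 'partially_tested', 'category': category}
--         elif interface_name in status['not_tested']:
--             return {'status': 'not_tested', 'category': category}
--     return {'status': 'unknown', 'category': 'unknown'}
-- ===== SOURCE B (Python) =====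
-- INTERFACE_TEST_STATUS = {
--     'configuration': {
--         'tested': [],
--         'partially_tested': [],
--         'not_tested': [
--             'IConfigurationManager',
--             'IConfigurationProvider',
--             'IConfigurationValidator',
--             'IConfigurationLoader',
--             'IConfigurationStore',
--             'IConfigurationCache',
--             'IConfigurationSecurity',
--             'IConfigurationMigration',
--             'IConfigurationBackup',
--             'IConfigurationRestore',
--             'IConfigurationSync',
--             'IConfigurationAudit',
--             'IConfigurationTemplate',
--             'IConfigurationSchema',
--             'IConfigurationRule',
--             'IConfigurationPolicy',
--             'IConfigurationCompliance',
--             'IConfigurationGovernance',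
--             'IConfigurationLifecycle',
--             'IConfigurationVersioning'
--         ]
--     },
--     'monitoring': {
--         'tested': [],
--         'partially_tested': [],
--         'not_tested': [
--             'IMonitor',
--             'IMonitorFactory',
--             'IPerformanceMonitor',
--             'IBusinessMetricsMonitor',
--             'ISystemMonitor',
--             'IApplicationMonitor',
--             'IAlertManager',
--             'IMetricsStore',
--             'IAlertStore',
--             'IMonitorPlugin',
--             'IStorageMonitorPlugin',
--             'IDisasterMonitorPlugin',
--             'IModelMonitorPlugin',
--             'IBehaviorMonitorPlugin',
--             'IMonitoringService',
--             'IMonitorDecorator',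
--             'IMonitoringIntegration',
--             'IMonitoringPerformanceOptimizer'
--         ]
--     },
--     'cache': {
--         'tested': [],
--         'partially_tested': [],
--         'not_tested': [
--             'ICache',
--             'ICacheManager',
--             'IL1Cache',
--             'IL2Cache',
--             'IL3Cache',
--             'IL4Cache',
--             'ILRUCache',
--             'ILFUCache',
--             'ITTLCache',
--             'ICompressionCache',
--             'IEncryptionCache',
--             'ITaggedCache',
--             'IIntelligentCache',
--             'IAdaptiveCache',
--             'ICacheFactory',
--             'ICacheDecorator',
--             'ICacheMonitor',
--             'ICacheOptimizer',
--             'ICacheIntegration',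
--             'ICacheSecurity'
--         ]
--     }
-- }
--
-- # Flat index built once at import time: interface name -> (status, category).
-- # First write wins, mirroring A's category-order / status-precedence early returns.
-- _INDEX = {}
-- for _cat, _status in INTERFACE_TEST_STATUS.items():
--     for _level in ('tested', 'partially_tested', 'not_tested'):
--         for _name in _status[_level]:
--             _INDEX.setdefault(_name, (_level, _cat))
--
--
-- def get_interface_test_status(interface_name: str) -> dict:
--     entry = _INDEX.get(interface_name)
--     if entry is None:
--         return {'status': 'unknown', 'category': 'unknown'}
--     return {'status': entry[0], 'category': entry[1]}
-- ===== Notes on version B (the rewrite author's own statement) =====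
-- stated objective: idiomatic
-- what changed: Replaces the per-call scan over nested category/status lists with a flat name->(status,category) dict built once at import time (first-write-wins preserving A's precedence); the function becomes a single dict lookup with an 'unknown' default.
import Mathlib
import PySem

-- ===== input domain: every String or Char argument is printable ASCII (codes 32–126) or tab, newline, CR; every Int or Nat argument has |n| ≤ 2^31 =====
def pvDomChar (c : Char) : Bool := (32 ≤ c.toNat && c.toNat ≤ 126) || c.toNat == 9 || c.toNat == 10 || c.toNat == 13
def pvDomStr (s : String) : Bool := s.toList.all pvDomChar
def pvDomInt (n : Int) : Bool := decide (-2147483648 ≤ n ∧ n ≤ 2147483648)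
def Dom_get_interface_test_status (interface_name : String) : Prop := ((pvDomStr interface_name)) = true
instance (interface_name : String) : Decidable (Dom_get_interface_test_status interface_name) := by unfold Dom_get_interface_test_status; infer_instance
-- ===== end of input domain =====

-- B replaces A's per-call scan over the nested category/status lists with a flat
-- name->(status,category) index built once (first-write-wins), looked up per call (idiomatic).

-- ===== PORT A =====
-- shared module-level constant INTERFACE_TEST_STATUS:
-- list of (category, (tested, partially_tested, not_tested))
def cfgNot : List String :=
  ["IConfigurationManager", "IConfigurationProvider", "IConfigurationValidator",
   "IConfigurationLoader", "IConfigurationStore", "IConfigurationCache",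
   "IConfigurationSecurity", "IConfigurationMigration", "IConfigurationBackup",
   "IConfigurationRestore", "IConfigurationSync", "IConfigurationAudit",
   "IConfigurationTemplate", "IConfigurationSchema", "IConfigurationRule",
   "IConfigurationPolicy", "IConfigurationCompliance", "IConfigurationGovernance",
   "IConfigurationLifecycle", "IConfigurationVersioning"]

def monNot : List String :=
  ["IMonitor", "IMonitorFactory", "IPerformanceMonitor", "IBusinessMetricsMonitor",
   "ISystemMonitor", "IApplicationMonitor", "IAlertManager", "IMetricsStore",
   "IAlertStore", "IMonitorPlugin", "IStorageMonitorPlugin", "IDisasterMonitorPlugin",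
   "IModelMonitorPlugin", "IBehaviorMonitorPlugin", "IMonitoringService",
   "IMonitorDecorator", "IMonitoringIntegration", "IMonitoringPerformanceOptimizer"]

def cacheNot : List String :=
  ["ICache", "ICacheManager", "IL1Cache", "IL2Cache", "IL3Cache", "IL4Cache",
   "ILRUCache", "ILFUCache", "ITTLCache", "ICompressionCache", "IEncryptionCache",
   "ITaggedCache", "IIntelligentCache", "IAdaptiveCache", "ICacheFactory",
   "ICacheDecorator", "ICacheMonitor", "ICacheOptimizer", "ICacheIntegration",
   "ICacheSecurity"]

def interfaceTestStatus : List (String × (List String × List String × List String)) :=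
  [("configuration", ([], [], cfgNot)),
   ("monitoring", ([], [], monNot)),
   ("cache", ([], [], cacheNot))]

-- A's for-loop over INTERFACE_TEST_STATUS.items() with the three membership tests
def statusScan (s : String) : List (String × (List String × List String × List String)) → List (String × String)
  | [] => [("status", "unknown"), ("category", "unknown")]
  | (cat, t, p, n) :: rest =>
    if t.contains s then [("status", "tested"), ("category", cat)]
    else if p.contains s then [("status", "partially_tested"), ("category", cat)]
    else if n.contains s then [("status", "not_tested"), ("category", cat)]
    else statusScan s rest

def get_interface_test_status (interface_name : String) : List (String × String) :=
  statusScan interface_name interfaceTestStatus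

-- ===== PORT B =====
-- dict.setdefault: insert only if the key is absent (first-write-wins)
def setDefault (d : List (String × String × String)) (k : String) (v : String × String) :
    List (String × String × String) :=
  if (d.lookup k).isSome then d else d ++ [(k, v)]

-- the module-level flat index _INDEX built once over the nested data
def flatIndex : List (String × String × String) :=
  interfaceTestStatus.foldl
    (fun d c =>
      let (cat, t, p, n) := c
      let d := t.foldl (fun d name => setDefault d name ("tested", cat)) d
      let d := p.foldl (fun d name => setDefault d name ("partially_tested", cat)) d
      n.foldl (fun d name => setDefault d name ("not_tested", cat)) d)
    []

def get_interface_test_status_alt (interface_name : String) : List (String × String) :=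
  match flatIndex.lookup interface_name with
  | some (st, cat) => [("status", st), ("category", cat)]
  | none => [("status", "unknown"), ("category", "unknown")]

-- ===== PRECONDITION & SPEC =====
def Spec_get_interface_test_status (interface_name : String) (out : List (String × String)) : Prop := out = get_interface_test_status_alt interface_name
instance (interface_name : String) (out : List (String × String)) : Decidable (Spec_get_interface_test_status interface_name out) := by unfold Spec_get_interface_test_status; infer_instance

-- ===== CLAIM (what is proved, stated in full; the proofs are below) =====
def Claim_equal_get_interface_test_status : Prop := ∀ (interface_name : String), Dom_get_interface_test_status interface_name → Spec_get_interface_test_status interface_name (get_interface_test_status interface_name)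

-- ===== LEMMAS AND PROOFS =====

-- the built index is the concatenation of the three per-category constant-valued blocks
set_option maxRecDepth 20000 in
theorem flatIndex_eq :
    flatIndex =
      cfgNot.map (fun n => (n, ("not_tested", "configuration")))
        ++ monNot.map (fun n => (n, ("not_tested", "monitoring")))
        ++ cacheNot.map (fun n => (n, ("not_tested", "cache"))) := by
  decide

-- lookup in a constant-valued block reduces to a membership test
theorem lookup_map_const_append (s : String) (names : List String) (v : String × String)
    (rest : List (String × String × String)) :
    List.lookup s (names.map (fun n => (n, v)) ++ rest)
      = if names.contains s then some v else List.lookup s rest := by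
  induction names with
  | nil => simp
  | cons a as ih =>
    cases h : (s == a) with
    | true => simp [eq_of_beq h]
    | false =>
      have hne : ¬ s = a := by simpa using h
      simp [List.lookup, h, ih, hne]

-- ===== VERDICT (by name: the statement is the Claim_ definition above) =====
theorem get_interface_test_status_spec : Claim_equal_get_interface_test_status := by
  intro s _
  unfold Spec_get_interface_test_status
  unfold get_interface_test_status get_interface_test_status_alt
  rw [flatIndex_eq, List.append_assoc, lookup_map_const_append, lookup_map_const_append,
    ← List.append_nil (cacheNot.map (fun n => (n, (("not_tested" : String), ("cache" : String))))),
    lookup_map_const_append]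
  simp only [interfaceTestStatus, statusScan, List.contains_nil, Bool.false_eq_true,
    if_false]
  split_ifs <;> simp [List.lookup]
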